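-- pv_equiv track=rewrite | github.com/shumanhi/nullion | src/nullion/builder_memory.py | _has_long_digit_run
-- ===== SOURCE A (Python) =====
-- MAX_VOLATILE_DIGIT_RUN = 9
--
-- def _has_long_digit_run(value: str) -> bool:
--     run = 0
--     for char in value:
--         if char.isdigit():
--             run += 1
--             if run >= MAX_VOLATILE_DIGIT_RUN:
--                 return True
--         else:
--             run = 0
--     return False
-- ===== SOURCE B (Python) =====
-- MAX_VOLATILE_DIGIT_RUN = 9
--
-- def _has_long_digit_run(value: str) -> bool:
--     n = len(value)
--     return any(
--         all(value[i + k].isdigit() for k in range(MAX_VOLATILE_DIGIT_RUN))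
--         for i in range(n - MAX_VOLATILE_DIGIT_RUN + 1)
--     )
-- ===== Notes on version B (the rewrite author's own statement) =====
-- stated objective: alternative
-- what changed: replaces the stateful run-counter scan with early return by a window check: is there a start index i with all 9 characters value[i..i+8] digits
import Mathlib
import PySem

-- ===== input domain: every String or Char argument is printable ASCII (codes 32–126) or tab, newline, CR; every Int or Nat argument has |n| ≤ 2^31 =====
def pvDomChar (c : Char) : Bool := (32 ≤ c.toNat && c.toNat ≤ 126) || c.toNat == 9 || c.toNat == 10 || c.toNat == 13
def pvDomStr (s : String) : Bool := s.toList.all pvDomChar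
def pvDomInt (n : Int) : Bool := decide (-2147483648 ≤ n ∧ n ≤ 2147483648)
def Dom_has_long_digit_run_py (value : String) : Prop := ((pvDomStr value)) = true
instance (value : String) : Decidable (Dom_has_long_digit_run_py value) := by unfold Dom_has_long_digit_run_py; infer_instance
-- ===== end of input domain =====

-- B replaces A's stateful run-counter scan by a window check (any start index with
-- 9 consecutive digits); objective: alternative (same asymptotic cost).

-- ===== PORT A =====
-- the loop of A: run counter, early return True at run >= 9, reset on non-digit
def pvALoop : List Char → Nat → Bool
  | [], _ => false
  | c :: rest, run =>
    if PySem.Chars.isdigit c then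
      if run + 1 ≥ 9 then true else pvALoop rest (run + 1)
    else pvALoop rest 0

def has_long_digit_run_py (value : String) : Bool := pvALoop value.toList 0

-- ===== PORT B =====
-- Source B: any(all(value[i+k].isdigit() for k in range(9)) for i in range(n - 8));
-- all indices i+k are in range, so list getD is exact for value[i+k]
def has_long_digit_run_py_alt (value : String) : Bool :=
  let cs := value.toList
  (List.range (cs.length - 8)).any fun i =>
    (List.range 9).all fun k => PySem.Chars.isdigit (cs.getD (i + k) ' ')

-- ===== PRECONDITION & SPEC =====
def Spec_has_long_digit_run_py (value : String) (out : Bool) : Prop := out = has_long_digit_run_py_alt value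
instance (value : String) (out : Bool) : Decidable (Spec_has_long_digit_run_py value out) := by unfold Spec_has_long_digit_run_py; infer_instance

-- ===== CLAIM (what is proved, stated in full; the proofs are below) =====
def Claim_equal_has_long_digit_run_py : Prop := ∀ (value : String), Dom_has_long_digit_run_py value → Spec_has_long_digit_run_py value (has_long_digit_run_py value)

-- ===== LEMMAS AND PROOFS =====

-- "a window of 9 digits starts at index i of cs"
def pvWin (cs : List Char) : Prop :=
  ∃ i, i + 9 ≤ cs.length ∧ ∀ k < 9, PySem.Chars.isdigit (cs.getD (i + k) ' ') = true

lemma pvWin_cons_of_not_digit {c : Char} {rest : List Char}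
    (hc : PySem.Chars.isdigit c = false) : pvWin (c :: rest) ↔ pvWin rest := by
  constructor
  · rintro ⟨i, hi, hall⟩
    cases i with
    | zero =>
      have := hall 0 (by omega)
      simp [List.getD] at this
      simp [hc] at this
    | succ j =>
      refine ⟨j, by simpa using hi, fun k hk => ?_⟩
      have := hall k hk
      simpa [Nat.succ_add, List.getD] using this
  · rintro ⟨i, hi, hall⟩
    refine ⟨i + 1, by simpa using hi, fun k hk => ?_⟩
    have := hall k hk
    simpa [Nat.succ_add, Nat.add_right_comm, List.getD] using this

-- characterisation of A's loop, for run ≤ 8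
lemma pvALoop_iff (cs : List Char) : ∀ run : Nat, run ≤ 8 →
    (pvALoop cs run = true ↔
      (∃ m, m + run = 9 ∧ m ≤ cs.length ∧ ∀ k < m, PySem.Chars.isdigit (cs.getD k ' ') = true)
      ∨ pvWin cs) := by
  induction cs with
  | nil =>
    intro run hrun
    simp only [pvALoop]
    constructor
    · intro h; exact absurd h (by simp)
    · rintro (⟨m, hm, hle, _⟩ | ⟨i, hi, _⟩)
      · simp at hle; omega
      · simp at hi
  | cons c rest ih =>
    intro run hrun
    by_cases hc : PySem.Chars.isdigit c = true
    · by_cases h9 : run + 1 ≥ 9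
      · have hrun8 : run = 8 := by omega
        simp only [pvALoop, hc, if_pos h9, if_true]
        constructor
        · intro _
          left
          exact ⟨1, by omega, by simp, by
            intro k hk
            interval_cases k
            simpa [List.getD] using hc⟩
        · intro _; trivial
      · have := ih (run + 1) (by omega)
        simp only [pvALoop, hc, if_neg h9, if_true]
        rw [this]
        constructor
        · rintro (⟨m, hm, hle, hall⟩ | hwin)
          · -- prefix of rest of length m, preceded by digit c, gives prefix of length m+1
            left
            refine ⟨m + 1, by omega, by simp; omega, fun k hk => ?_⟩
            cases k with
            | zero => simpa [List.getD] using hc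
            | succ j =>
              have := hall j (by omega)
              simpa [List.getD] using this
          · right
            rcases hwin with ⟨i, hi, hall⟩
            exact ⟨i + 1, by simp; omega, fun k hk => by
              have := hall k hk
              simpa [Nat.succ_add, Nat.add_right_comm, List.getD] using this⟩
        · rintro (⟨m, hm, hle, hall⟩ | hwin)
          · -- m ≥ 1 since run ≤ 7; drop the head digit
            left
            have hm1 : 1 ≤ m := by omega
            refine ⟨m - 1, by omega, by simp at hle; omega, fun k hk => ?_⟩
            have := hall (k + 1) (by omega)
            simpa [List.getD] using this
          · -- a window in c :: rest: either starts at 0 (then its tail gives the prefix) or in rest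
            rcases hwin with ⟨i, hi, hall⟩
            cases i with
            | zero =>
              left
              refine ⟨8 - run, by omega, by simp at hi; omega, fun k hk => ?_⟩
              have := hall (k + 1) (by omega)
              simpa [List.getD] using this
            | succ j =>
              right
              refine ⟨j, by simp at hi; omega, fun k hk => ?_⟩
              have := hall k hk
              simpa [Nat.succ_add, List.getD] using this
    · have hc' : PySem.Chars.isdigit c = false := by simpa using hc
      simp only [pvALoop, hc', if_false, Bool.false_eq_true]
      rw [ih 0 (by omega), pvWin_cons_of_not_digit hc']
      constructor
      · rintro (⟨m, hm, hle, hall⟩ | hwin)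
        · right; exact ⟨0, by omega, fun k hk => by simpa using hall k (by omega)⟩
        · right; exact hwin
      · rintro (⟨m, hm, hle, hall⟩ | hwin)
        · -- first element of the prefix would be the non-digit c: impossible
          exfalso
          have hm1 : 1 ≤ m := by omega
          have := hall 0 (by omega)
          simp [List.getD] at this
          simp [hc'] at this
        · right; exact hwin

lemma pvA_iff (value : String) : has_long_digit_run_py value = true ↔ pvWin value.toList := by
  rw [has_long_digit_run_py, pvALoop_iff _ 0 (by omega)]
  constructor
  · rintro (⟨m, hm, hle, hall⟩ | hwin)
    · exact ⟨0, by omega, fun k hk => by simpa using hall k (by omega)⟩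
    · exact hwin
  · intro h; right; exact h

lemma pvB_iff (value : String) : has_long_digit_run_py_alt value = true ↔ pvWin value.toList := by
  simp only [has_long_digit_run_py_alt, List.any_eq_true, List.all_eq_true, List.mem_range]
  constructor
  · rintro ⟨i, hi, hall⟩
    exact ⟨i, by omega, fun k hk => hall k hk⟩
  · rintro ⟨i, hi, hall⟩
    exact ⟨i, by omega, fun k hk => hall k hk⟩

-- ===== VERDICT (by name: the statement is the Claim_ definition above) =====
theorem has_long_digit_run_py_spec : Claim_equal_has_long_digit_run_py := by
  intro value _
  unfold Spec_has_long_digit_run_py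
  rw [Bool.eq_iff_iff, pvA_iff, pvB_iff]
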